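-- pv_equiv track=rewrite | github.com/chenmozhijin/LDDC | LDDC/backend/lyrics.py | get_full_timestamps_lyrics_data
-- ===== SOURCE A (Python) =====
-- from typing import TYPE_CHECKING, Literal, NewType, TypeVar, overload
--
-- LyricsWord = NewType("LyricsWord", tuple[int | None, int | None, str])
--
-- LyricsLine = NewType("LyricsLine", tuple[int | None, int | None, list[LyricsWord]])
--
-- LyricsData = NewType("LyricsData", list[LyricsLine])
--
-- FSLyricsWord = NewType("FSLyricsWord", tuple[int, int, str])
--
-- FSLyricsLine = NewType("FSLyricsLine", tuple[int, int, list[FSLyricsWord]])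
--
-- FSLyricsData = NewType("FSLyricsData", list[FSLyricsLine])
--
-- def get_full_timestamps_lyrics_data(data: LyricsData, duration: int | None, only_line: bool = False, skip_none: bool = False) -> LyricsData | FSLyricsData:
--     """获取完整时间戳的歌词数据
--
--     :param data: 歌词数据
--     :param end_time: 歌曲结束时间
--     :param only_line: 是否只推算行时间戳
--     :param skip_none: 是否跳过无法推算时间戳的行
--     """
--     result = LyricsData([])
--     fsresult = FSLyricsData([])
--     for i, line in enumerate(data):
--         line_start_time = line[2][0][0] if line[0] is None and line[2] and line[2][0][0] is not None else line[0]
--         line_end_time = line[2][-1][1] if line[1] is None and line[2] and line[2][-1][1] is not None else line[1]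
--         if line_start_time is None:
--             if i == 0:
--                 line_start_time = 0
--             elif data[i - 1][1] is not None:
--                 line_start_time = data[i - 1][1]
--
--         if line_end_time is None:
--             if i == len(data) - 1:
--                 if duration is not None and line_start_time is not None:
--                     if duration >= line_start_time:
--                         line_end_time = duration
--                 else:
--                     line_end_time = duration
--             elif data[i + 1][0] is not None:
--                 line_end_time = data[i + 1][0]
--
--         if only_line:
--             if not skip_none or (line_start_time is not None and line_end_time is not None):
--                 result.append(LyricsLine((line_start_time, line_end_time, line[2])))
--             continue
--
--         words: list[LyricsWord] = []
--         fswords = []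
--         for j, word in enumerate(line[2]):
--             word_start_time = word[0]
--             word_end_time = word[1]
--             if word_start_time is None:
--                 if j == 0 and line_start_time is not None:
--                     word_start_time = line_start_time
--                 elif j != 0 and line[2][j - 1][1] is not None:
--                     word_start_time = line[2][j - 1][1]
--
--             if word_end_time is None:
--                 if j == len(line[2]) - 1 and line_end_time is not None:
--                     word_end_time = line_end_time
--                 elif j != len(line[2]) - 1 and line[2][j + 1][0] is not None:
--                     word_end_time = line[2][j + 1][0]
--
--             if not skip_none:
--                 words.append(LyricsWord((word_start_time, word_end_time, word[2])))
--             else: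
--                 if word_start_time is None or word_end_time is None:
--                     continue
--                 fswords.append(FSLyricsWord((word_start_time, word_end_time, word[2])))
--
--         if not skip_none:
--             result.append(LyricsLine((line_start_time, line_end_time, words)))
--         else:
--             if line_start_time is None or line_end_time is None:
--                 continue
--             fsresult.append(FSLyricsLine((line_start_time, line_end_time, fswords)))
--
--     if only_line is False and skip_none is True:
--         return fsresult
--     return result
-- ===== SOURCE B (Python) =====
-- def _forward_starts(starts, ends, head_default):
--     """Left-to-right sweep: a missing start becomes the carried value
--     (head_default for the first element, afterwards the raw end of the
--     element just before it)."""
--     res = []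
--     carry = head_default
--     for s, e in zip(starts, ends):
--         res.append(s if s is not None else carry)
--         carry = e
--     return res
--
--
-- def _backward_ends(ends, starts, tail_default):
--     """Right-to-left sweep: the mirror image of _forward_starts."""
--     return list(reversed(_forward_starts(list(reversed(ends)),
--                                          list(reversed(starts)),
--                                          tail_default)))
--
--
-- def _fill_words(words, line_start, line_end):
--     ws = _forward_starts([w[0] for w in words], [w[1] for w in words], line_start)
--     we = _backward_ends([w[1] for w in words], [w[0] for w in words], line_end)
--     return [(s, e, w[2]) for s, e, w in zip(ws, we, words)]
--
--
-- def get_full_timestamps_lyrics_data(data, duration, only_line=False, skip_none=False):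
--     raw_starts = [ln[0] if ln[0] is not None else (ln[2][0][0] if ln[2] else None)
--                   for ln in data]
--     raw_ends = [ln[1] if ln[1] is not None else (ln[2][-1][1] if ln[2] else None)
--                 for ln in data]
--     starts = _forward_starts(raw_starts, [ln[1] for ln in data], 0)
--     if data:
--         tail = duration
--         if duration is not None and starts[-1] is not None and duration < starts[-1]:
--             tail = None
--         ends = _backward_ends(raw_ends, [ln[0] for ln in data], tail)
--     else:
--         ends = []
--     out = []
--     for ln, ls, le in zip(data, starts, ends):
--         if skip_none and (ls is None or le is None):
--             continue
--         if only_line: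
--             out.append((ls, le, ln[2]))
--             continue
--         words = _fill_words(ln[2], ls, le)
--         if skip_none:
--             words = [w for w in words if w[0] is not None and w[1] is not None]
--         out.append((ls, le, words))
--     return out
-- ===== Notes on version B (the rewrite author's own statement) =====
-- stated objective: alternative
-- what changed: B replaces A's single indexed loop (which resolves both bounds of each line/word in place via data[i-1]/data[i+1] lookups and two mutable result lists) by a direction-split sweep algorithm: missing start times are resolved by one left-to-right sweep carrying the previous raw end, missing end times by one right-to-left sweep carrying the next raw start (the backward sweep is the forward sweep on reversed lists), and a final assembly zips lines with the resolved bounds.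
import Mathlib
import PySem

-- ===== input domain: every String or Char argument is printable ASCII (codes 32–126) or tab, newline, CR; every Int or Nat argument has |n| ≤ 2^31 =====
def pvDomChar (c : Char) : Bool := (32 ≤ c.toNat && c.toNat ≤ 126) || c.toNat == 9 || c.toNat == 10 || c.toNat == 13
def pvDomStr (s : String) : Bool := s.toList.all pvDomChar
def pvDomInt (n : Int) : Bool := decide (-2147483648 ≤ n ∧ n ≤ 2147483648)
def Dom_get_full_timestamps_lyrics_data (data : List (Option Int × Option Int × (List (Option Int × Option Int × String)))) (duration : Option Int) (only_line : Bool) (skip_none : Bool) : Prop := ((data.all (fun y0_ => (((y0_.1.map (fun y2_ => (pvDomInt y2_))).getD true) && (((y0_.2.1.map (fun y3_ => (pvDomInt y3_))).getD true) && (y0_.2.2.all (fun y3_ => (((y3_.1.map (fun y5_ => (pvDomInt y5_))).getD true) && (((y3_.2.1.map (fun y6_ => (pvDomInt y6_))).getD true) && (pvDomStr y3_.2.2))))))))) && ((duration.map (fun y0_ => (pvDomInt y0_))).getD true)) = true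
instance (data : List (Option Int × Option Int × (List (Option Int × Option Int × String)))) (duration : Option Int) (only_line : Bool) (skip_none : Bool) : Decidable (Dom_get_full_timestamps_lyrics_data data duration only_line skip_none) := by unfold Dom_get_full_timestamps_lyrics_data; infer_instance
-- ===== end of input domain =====

-- B resolves the missing timestamps by a direction-split sweep algorithm: one left-to-right
-- sweep fills missing start times from a carried previous raw end, one right-to-left sweep
-- (the same sweep on reversed lists) fills missing end times from the next raw start, and a
-- final assembly zips lines with the precomputed bounds — instead of A's single indexed loop
-- with data[i-1]/data[i+1] lookups and two mutable result lists.  Objective: alternative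
-- decomposition, same asymptotic cost.  Return value only (A mutates nothing observable).

-- ===== PORT A =====
-- A-side helper: the line_start_time / line_end_time computation of A's loop body
-- (uses the raw neighbours data[i-1], data[i+1] exactly as A does).
def pvLineTimesA (data : List (Option Int × Option Int × (List (Option Int × Option Int × String)))) (duration : Option Int) (i : Int) (line : Option Int × Option Int × (List (Option Int × Option Int × String))) : Option Int × Option Int :=
  let ws := line.2.2
  let lst0 : Option Int :=
    if line.1 = none ∧ ws.head?.bind (fun w => w.1) ≠ none then ws.head?.bind (fun w => w.1) else line.1
  let lst : Option Int :=
    if lst0 = none then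
      (if i = 0 then some 0
       else if (PySem.List.pyGetD data (i - 1) default).2.1 ≠ none then (PySem.List.pyGetD data (i - 1) default).2.1 else none)
    else lst0
  let le0 : Option Int :=
    if line.2.1 = none ∧ ws.getLast?.bind (fun w => w.2.1) ≠ none then ws.getLast?.bind (fun w => w.2.1) else line.2.1
  let le : Option Int :=
    if le0 = none then
      (if i = (data.length : Int) - 1 then
         (match duration, lst with
          | some d, some s => if s ≤ d then some d else none
          | d, _ => d)
       else if (PySem.List.pyGetD data (i + 1) default).1 ≠ none then (PySem.List.pyGetD data (i + 1) default).1 else none)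
    else le0
  (lst, le)

-- A-side helper: the word_start_time / word_end_time computation of A's inner loop body.
def pvWordTimesA (ws : List (Option Int × Option Int × String)) (lst le : Option Int) (j : Int) (w : Option Int × Option Int × String) : Option Int × Option Int :=
  let wst : Option Int :=
    if w.1 = none then
      (if j = 0 then (if lst ≠ none then lst else none)
       else if (PySem.List.pyGetD ws (j - 1) default).2.1 ≠ none then (PySem.List.pyGetD ws (j - 1) default).2.1 else none)
    else w.1
  let wet : Option Int :=
    if w.2.1 = none then
      (if j = (ws.length : Int) - 1 then (if le ≠ none then le else none)
       else if (PySem.List.pyGetD ws (j + 1) default).1 ≠ none then (PySem.List.pyGetD ws (j + 1) default).1 else none)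
    else w.2.1
  (wst, wet)

def get_full_timestamps_lyrics_data (data : List (Option Int × Option Int × (List (Option Int × Option Int × String)))) (duration : Option Int) (only_line : Bool) (skip_none : Bool) : List (Option Int × Option Int × (List (Option Int × Option Int × String))) :=
  let res := (PySem.List.enumerate data 0).foldl (fun acc p =>
    let lt := pvLineTimesA data duration p.1 p.2
    if only_line then
      (if skip_none = false ∨ (lt.1 ≠ none ∧ lt.2 ≠ none) then (acc.1 ++ [(lt.1, lt.2, p.2.2.2)], acc.2) else acc)
    else
      let wres := (PySem.List.enumerate p.2.2.2 0).foldl (fun wacc q =>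
        let wt := pvWordTimesA p.2.2.2 lt.1 lt.2 q.1 q.2
        if skip_none = false then (wacc.1 ++ [(wt.1, wt.2, q.2.2.2)], wacc.2)
        else if wt.1 = none ∨ wt.2 = none then wacc
        else (wacc.1, wacc.2 ++ [(wt.1, wt.2, q.2.2.2)])) (([], []) : List (Option Int × Option Int × String) × List (Option Int × Option Int × String))
      if skip_none = false then (acc.1 ++ [(lt.1, lt.2, wres.1)], acc.2)
      else if lt.1 = none ∨ lt.2 = none then acc
      else (acc.1, acc.2 ++ [(lt.1, lt.2, wres.2)]))
    (([], []) : List (Option Int × Option Int × (List (Option Int × Option Int × String))) × List (Option Int × Option Int × (List (Option Int × Option Int × String))))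
  if only_line = false ∧ skip_none = true then res.2 else res.1

-- ===== PORT B =====
-- B-side helper: left-to-right sweep — a missing start becomes the carried value
-- (headDefault at the head, afterwards the raw end of the element just before it).
def pvForwardStarts (starts ends : List (Option Int)) (headDefault : Option Int) : List (Option Int) :=
  ((starts.zip ends).foldl
    (fun (acc : List (Option Int) × Option Int) p =>
      (acc.1 ++ [if p.1 ≠ none then p.1 else acc.2], p.2))
    ([], headDefault)).1

-- B-side helper: right-to-left sweep — the mirror image of pvForwardStarts.
def pvBackwardEnds (ends starts : List (Option Int)) (tailDefault : Option Int) : List (Option Int) :=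
  (pvForwardStarts ends.reverse starts.reverse tailDefault).reverse

-- B-side helper: fill the word timestamps of one line with the two sweeps.
def pvFillWordsB (words : List (Option Int × Option Int × String)) (ls le : Option Int) : List (Option Int × Option Int × String) :=
  let ws := pvForwardStarts (words.map (fun w => w.1)) (words.map (fun w => w.2.1)) ls
  let we := pvBackwardEnds (words.map (fun w => w.2.1)) (words.map (fun w => w.1)) le
  (ws.zip (we.zip words)).map (fun t => (t.1, t.2.1, t.2.2.2.2))

-- B-side helper: resolved line start times (raw starts swept forward).
def pvLineStartsB (data : List (Option Int × Option Int × (List (Option Int × Option Int × String)))) : List (Option Int) :=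
  pvForwardStarts
    (data.map (fun ln => if ln.1 ≠ none then ln.1 else (match ln.2.2 with | [] => none | w :: _ => w.1)))
    (data.map (fun ln => ln.2.1)) (some 0)

-- B-side helper: resolved line end times (raw ends swept backward; tail default from duration).
def pvLineEndsB (data : List (Option Int × Option Int × (List (Option Int × Option Int × String)))) (duration : Option Int) : List (Option Int) :=
  if data.isEmpty then [] else
    let ls := (pvLineStartsB data).getLast?.getD none
    let tl : Option Int :=
      if duration ≠ none ∧ ls ≠ none ∧ duration.getD 0 < ls.getD 0 then none else duration
    pvBackwardEnds
      (data.map (fun ln => if ln.2.1 ≠ none then ln.2.1 else (match ln.2.2.getLast? with | none => none | some w => w.2.1)))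
      (data.map (fun ln => ln.1)) tl

def get_full_timestamps_lyrics_data_alt (data : List (Option Int × Option Int × (List (Option Int × Option Int × String)))) (duration : Option Int) (only_line : Bool) (skip_none : Bool) : List (Option Int × Option Int × (List (Option Int × Option Int × String))) :=
  (data.zip ((pvLineStartsB data).zip (pvLineEndsB data duration))).foldl
    (fun out p =>
      if skip_none = true ∧ (p.2.1 = none ∨ p.2.2 = none) then out
      else if only_line then out ++ [(p.2.1, p.2.2, p.1.2.2)]
      else
        let words := pvFillWordsB p.1.2.2 p.2.1 p.2.2
        let words := if skip_none then words.filter (fun w => w.1.isSome && w.2.1.isSome) else words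
        out ++ [(p.2.1, p.2.2, words)])
    []

-- ===== PRECONDITION & SPEC =====
def Spec_get_full_timestamps_lyrics_data (data : List (Option Int × Option Int × (List (Option Int × Option Int × String)))) (duration : Option Int) (only_line : Bool) (skip_none : Bool) (out : List (Option Int × Option Int × (List (Option Int × Option Int × String)))) : Prop := out = get_full_timestamps_lyrics_data_alt data duration only_line skip_none
instance (data : List (Option Int × Option Int × (List (Option Int × Option Int × String)))) (duration : Option Int) (only_line : Bool) (skip_none : Bool) (out : List (Option Int × Option Int × (List (Option Int × Option Int × String)))) : Decidable (Spec_get_full_timestamps_lyrics_data data duration only_line skip_none out) := by unfold Spec_get_full_timestamps_lyrics_data; exact @instDecidableEqList _ instDecidableEqProd _ _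

-- ===== CLAIM (what is proved, stated in full; the proofs are below) =====
def Claim_equal_get_full_timestamps_lyrics_data : Prop := ∀ (data : List (Option Int × Option Int × (List (Option Int × Option Int × String)))) (duration : Option Int) (only_line : Bool) (skip_none : Bool), Dom_get_full_timestamps_lyrics_data data duration only_line skip_none → Spec_get_full_timestamps_lyrics_data data duration only_line skip_none (get_full_timestamps_lyrics_data data duration only_line skip_none)

-- ===== LEMMAS AND PROOFS =====

theorem pv_fs_shift (l : List (Option Int × Option Int)) (a : List (Option Int)) (d : Option Int) :
    l.foldl (fun (acc : List (Option Int) × Option Int) p =>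
      (acc.1 ++ [if p.1 ≠ none then p.1 else acc.2], p.2)) (a, d)
    = (a ++ (l.foldl (fun (acc : List (Option Int) × Option Int) p =>
      (acc.1 ++ [if p.1 ≠ none then p.1 else acc.2], p.2)) ([], d)).1,
       (l.foldl (fun (acc : List (Option Int) × Option Int) p =>
      (acc.1 ++ [if p.1 ≠ none then p.1 else acc.2], p.2)) ([], d)).2) := by
  induction l generalizing a d with
  | nil => simp
  | cons x xs ih =>
    simp only [List.foldl_cons]
    rw [ih, ih ([] ++ [if x.1 ≠ none then x.1 else d]) x.2]
    simp

theorem pv_fs_cons (s e : Option Int) (ss es : List (Option Int)) (d : Option Int) :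
    pvForwardStarts (s :: ss) (e :: es) d = (if s ≠ none then s else d) :: pvForwardStarts ss es e := by
  simp only [pvForwardStarts, List.zip_cons_cons, List.foldl_cons]
  rw [pv_fs_shift]
  simp

theorem pv_fs_length (ss es : List (Option Int)) (d : Option Int) :
    (pvForwardStarts ss es d).length = min ss.length es.length := by
  induction ss generalizing es d with
  | nil => simp [pvForwardStarts]
  | cons s ss ih =>
    cases es with
    | nil => simp [pvForwardStarts]
    | cons e es => simp [pv_fs_cons, ih, Nat.succ_min_succ]

theorem pv_fs_get (ss es : List (Option Int)) (d : Option Int) (k : Nat)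
    (h1 : k < ss.length) (hk : k < (pvForwardStarts ss es d).length) :
    (pvForwardStarts ss es d)[k] =
      if ss[k] ≠ none then ss[k] else (if k = 0 then d else es.getD (k - 1) none) := by
  induction ss generalizing es d k with
  | nil => simp at h1
  | cons s ss ih =>
    cases es with
    | nil => rw [pv_fs_length] at hk; simp at hk
    | cons e es =>
      cases k with
      | zero => simp [pv_fs_cons]
      | succ k' =>
        have hk' : k' < (pvForwardStarts ss es e).length := by
          rw [pv_fs_length] at hk ⊢; simp at hk ⊢; omega
        simp only [pv_fs_cons, List.getElem_cons_succ]
        rw [ih es e k' (by simpa using h1) hk']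
        cases k' with
        | zero => simp
        | succ k'' => simp

theorem pv_be_length (es ss : List (Option Int)) (t : Option Int) :
    (pvBackwardEnds es ss t).length = min es.length ss.length := by
  simp [pvBackwardEnds, pv_fs_length]

theorem pv_be_get (es ss : List (Option Int)) (t : Option Int) (k : Nat)
    (hlen : ss.length = es.length) (h1 : k < es.length) (hk : k < (pvBackwardEnds es ss t).length) :
    (pvBackwardEnds es ss t)[k] =
      if es[k] ≠ none then es[k] else (if k = es.length - 1 then t else ss.getD (k + 1) none) := by
  have hfs : (pvForwardStarts es.reverse ss.reverse t).length = es.length := by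
    rw [pv_fs_length]; simp [hlen]
  unfold pvBackwardEnds at hk ⊢
  rw [List.getElem_reverse]
  simp only [hfs]
  have hm1 : es.length - 1 - k < es.reverse.length := by simp; omega
  rw [pv_fs_get es.reverse ss.reverse t (es.length - 1 - k) hm1 (by omega)]
  have hpick : es.reverse[es.length - 1 - k]'hm1 = es[k]'h1 := by
    rw [List.getElem_reverse]
    congr 1
    omega
  rw [hpick]
  by_cases hz : es[k] = none
  · simp only [hz, ne_eq, not_true_eq_false, if_false]
    by_cases hlast : k = es.length - 1
    · have h0 : es.length - 1 - k = 0 := by omega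
      simp [h0, hlast]
    · have hnz : ¬ (es.length - 1 - k = 0) := by omega
      rw [if_neg hnz, if_neg hlast]
      have hidx : es.length - 1 - k - 1 < ss.reverse.length := by simp; omega
      rw [List.getD_eq_getElem _ _ hidx, List.getElem_reverse,
          List.getD_eq_getElem _ _ (by omega : k + 1 < ss.length)]
      congr 1
      omega
  · simp [hz]

theorem pv_foldl_app_fst {α β γ : Type} (f : α → γ) (l : List α) (a : List γ) (b : β) :
    l.foldl (fun acc x => (acc.1 ++ [f x], acc.2)) (a, b) = (a ++ l.map f, b) := by
  induction l generalizing a with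
  | nil => simp
  | cons x xs ih => simp [ih]

theorem pv_foldl_app_fst_if {α β γ : Type} (p : α → Prop) [DecidablePred p] (f : α → γ) (l : List α) (a : List γ) (b : β) :
    l.foldl (fun acc x => if p x then (acc.1 ++ [f x], acc.2) else acc) (a, b) =
      (a ++ (l.filter (fun x => decide (p x))).map f, b) := by
  induction l generalizing a with
  | nil => simp
  | cons x xs ih =>
    by_cases h : p x <;> simp [h, ih]

theorem pv_foldl_app_snd_if {α β γ : Type} (p : α → Prop) [DecidablePred p] (f : α → γ) (l : List α) (a : β) (b : List γ) :
    l.foldl (fun acc x => if p x then acc else (acc.1, acc.2 ++ [f x])) (a, b) =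
      (a, b ++ (l.filter (fun x => !decide (p x))).map f) := by
  induction l generalizing b with
  | nil => simp
  | cons x xs ih =>
    by_cases h : p x <;> simp [h, ih]

-- the resolved line bounds of B coincide with A's per-line computation
theorem pv_le_length (data : List (Option Int × Option Int × (List (Option Int × Option Int × String)))) (duration : Option Int) :
    (pvLineEndsB data duration).length = data.length := by
  cases data with
  | nil => simp [pvLineEndsB]
  | cons x xs => simp [pvLineEndsB, pv_be_length]

theorem pv_start_get (data : List (Option Int × Option Int × (List (Option Int × Option Int × String)))) (duration : Option Int) (k : Nat) (hk : k < data.length) (h2 : k < (pvLineStartsB data).length) :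
    (pvLineStartsB data)[k] = (pvLineTimesA data duration ((0 : Int) + k) data[k]).1 := by
  simp only [pvLineStartsB] at h2 ⊢
  rw [pv_fs_get _ _ _ k (by simpa using hk) h2]
  simp only [List.getElem_map, pvLineTimesA]
  have hhead : (match data[k].2.2 with | [] => (none : Option Int) | w :: _ => w.1)
      = data[k].2.2.head?.bind (fun w => w.1) := by
    cases data[k].2.2 <;> simp
  have hls0 : (if data[k].1 ≠ none then data[k].1 else data[k].2.2.head?.bind (fun w => w.1))
      = (if data[k].1 = none ∧ data[k].2.2.head?.bind (fun w => w.1) ≠ none then data[k].2.2.head?.bind (fun w => w.1) else data[k].1) := by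
    cases data[k].1 <;> cases data[k].2.2.head?.bind (fun w => w.1) <;> simp
  rw [hhead, hls0]
  generalize (if data[k].1 = none ∧ data[k].2.2.head?.bind (fun w => w.1) ≠ none then data[k].2.2.head?.bind (fun w => w.1) else data[k].1) = ls0
  by_cases hz : ls0 = none
  · simp only [hz, ne_eq, not_true_eq_false, if_false, if_true]
    cases k with
    | zero => norm_num
    | succ k' =>
      have hne : ¬ ((0 : Int) + ((k' + 1 : Nat) : Int) = 0) := by push_cast; omega
      rw [if_neg (by omega : ¬ (k' + 1 = 0)), if_neg hne]
      have hc : (0 : Int) + ((k' + 1 : Nat) : Int) - 1 = ((k' : Nat) : Int) := by push_cast; ring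
      rw [hc, PySem.List.pyGetD_natCast]
      simp only [Nat.add_sub_cancel]
      rw [List.getD_eq_getElem _ _ (by simp; omega : k' < (data.map (fun ln => ln.2.1)).length), List.getD_eq_getElem _ _ (by omega : k' < data.length)]
      simp only [List.getElem_map]
      cases data[k'].2.1 <;> simp
  · simp [hz]

theorem pvLineTimesA_snd (data : List (Option Int × Option Int × (List (Option Int × Option Int × String)))) (duration : Option Int) (i : Int) (line : Option Int × Option Int × (List (Option Int × Option Int × String))) :
    (pvLineTimesA data duration i line).2 =
      (let le0 : Option Int := if line.2.1 = none ∧ line.2.2.getLast?.bind (fun w => w.2.1) ≠ none then line.2.2.getLast?.bind (fun w => w.2.1) else line.2.1;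
       if le0 = none then
         (if i = (data.length : Int) - 1 then
            (match duration, (pvLineTimesA data duration i line).1 with
             | some d, some s => if s ≤ d then some d else none
             | d, _ => d)
          else if (PySem.List.pyGetD data (i + 1) default).1 ≠ none then (PySem.List.pyGetD data (i + 1) default).1 else none)
       else le0) := rfl

theorem pv_end_get (data : List (Option Int × Option Int × (List (Option Int × Option Int × String)))) (duration : Option Int) (k : Nat) (hk : k < data.length) (h2 : k < (pvLineEndsB data duration).length) :
    (pvLineEndsB data duration)[k] = (pvLineTimesA data duration ((0 : Int) + k) data[k]).2 := by
  have hne : data.isEmpty = false := by cases data with | nil => simp at hk | cons a l => rfl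
  have hsl : (pvLineStartsB data).length = data.length := by
    simp [pvLineStartsB, pv_fs_length]
  simp only [pvLineEndsB, hne, Bool.false_eq_true, if_false] at h2 ⊢
  rw [pv_be_get _ _ _ k (by simp) (by simpa using hk) h2]
  simp only [List.getElem_map, List.length_map, pvLineTimesA_snd]
  have hlast : (match data[k].2.2.getLast? with | none => (none : Option Int) | some w => w.2.1)
      = data[k].2.2.getLast?.bind (fun w => w.2.1) := by
    cases data[k].2.2.getLast? <;> simp
  have hle0 : (if data[k].2.1 ≠ none then data[k].2.1 else data[k].2.2.getLast?.bind (fun w => w.2.1))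
      = (if data[k].2.1 = none ∧ data[k].2.2.getLast?.bind (fun w => w.2.1) ≠ none then data[k].2.2.getLast?.bind (fun w => w.2.1) else data[k].2.1) := by
    cases data[k].2.1 <;> cases data[k].2.2.getLast?.bind (fun w => w.2.1) <;> simp
  rw [hlast, hle0]
  generalize (if data[k].2.1 = none ∧ data[k].2.2.getLast?.bind (fun w => w.2.1) ≠ none then data[k].2.2.getLast?.bind (fun w => w.2.1) else data[k].2.1) = le0
  by_cases hz : le0 = none
  · simp only [hz, ne_eq, not_true_eq_false, if_false, if_true]
    by_cases hl : k = data.length - 1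
    · have hci : ((0 : Int) + (k : Int) = (data.length : Int) - 1) := by omega
      rw [if_pos hl, if_pos hci]
      have hlsv : (pvLineStartsB data).getLast?.getD none
          = (pvLineTimesA data duration ((0 : Int) + k) data[k]).1 := by
        rw [List.getLast?_eq_getElem?]
        have hsl1 : (pvLineStartsB data).length - 1 = k := by omega
        rw [hsl1, List.getElem?_eq_getElem (by omega : k < (pvLineStartsB data).length)]
        simp only [Option.getD_some]
        exact pv_start_get data duration k hk (by omega)
      rw [hlsv]
      generalize (pvLineTimesA data duration ((0 : Int) + (k : Int)) data[k]).1 = ls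
      cases duration with
      | none => cases ls <;> simp
      | some d =>
        cases ls with
        | none => simp
        | some sv =>
          simp only [Option.getD_some]
          by_cases hlt : d < sv
          · rw [if_pos ⟨by simp, by simp, hlt⟩]
            rw [if_neg (by omega : ¬ (sv ≤ d))]
          · rw [if_neg (by intro hcon; exact hlt hcon.2.2)]
            rw [if_pos (by omega : sv ≤ d)]
    · have hci : ¬ ((0 : Int) + (k : Int) = (data.length : Int) - 1) := by omega
      rw [if_neg hl, if_neg hci]
      have hkk : k + 1 < data.length := by omega
      have hc2 : (0 : Int) + (k : Int) + 1 = ((k + 1 : Nat) : Int) := by push_cast; ring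
      rw [hc2, PySem.List.pyGetD_natCast, List.getD_eq_getElem _ _ (by simp; omega : k + 1 < (data.map (fun ln => ln.1)).length), List.getD_eq_getElem _ _ hkk]
      simp only [List.getElem_map]
      cases data[k+1].1 <;> simp
  · simp [hz]

theorem pv_bounds_eq (data : List (Option Int × Option Int × (List (Option Int × Option Int × String)))) (duration : Option Int) :
    (pvLineStartsB data).zip (pvLineEndsB data duration) =
      (PySem.List.enumerate data 0).map (fun p => pvLineTimesA data duration p.1 p.2) := by
  have hsl : (pvLineStartsB data).length = data.length := by
    rw [pvLineStartsB, pv_fs_length]; simp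
  have hel := pv_le_length data duration
  apply List.ext_getElem
  · simp [hsl, hel, PySem.List.length_enumerate]
  · intro k h1 h2
    have hk : k < data.length := by simpa [PySem.List.length_enumerate] using h2
    simp only [List.getElem_zip, List.getElem_map, PySem.List.getElem_enumerate]
    exact Prod.ext (pv_start_get data duration k hk (by omega)) (pv_end_get data duration k hk (by omega))

-- B's word filling coincides with A's per-word computation
theorem pv_fill_eq (ws : List (Option Int × Option Int × String)) (ls le : Option Int) :
    pvFillWordsB ws ls le =
      (PySem.List.enumerate ws 0).map (fun q =>
        ((pvWordTimesA ws ls le q.1 q.2).1, (pvWordTimesA ws ls le q.1 q.2).2, q.2.2.2)) := by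
  have hfsl : (pvForwardStarts (ws.map (fun w => w.1)) (ws.map (fun w => w.2.1)) ls).length = ws.length := by
    rw [pv_fs_length]; simp
  have hbel : (pvBackwardEnds (ws.map (fun w => w.2.1)) (ws.map (fun w => w.1)) le).length = ws.length := by
    rw [pv_be_length]; simp
  apply List.ext_getElem
  · simp [pvFillWordsB, hfsl, hbel, PySem.List.length_enumerate]
  · intro k h1 h2
    have hk : k < ws.length := by
      simpa [PySem.List.length_enumerate] using h2
    simp only [pvFillWordsB, List.getElem_map, List.getElem_zip, PySem.List.getElem_enumerate]
    rw [pv_fs_get _ _ _ k (by simpa using hk) (by omega)]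
    rw [pv_be_get _ _ _ k (by simp) (by simpa using hk) (by omega)]
    simp only [List.getElem_map, List.length_map, pvWordTimesA, Prod.mk.injEq]
    refine ⟨?_, ?_, trivial⟩
    · by_cases hw : ws[k].1 = none
      · simp only [hw, ne_eq, not_true_eq_false, if_false, if_true]
        cases k with
        | zero =>
          rw [if_pos rfl, if_pos (by norm_num : (0 : Int) + ((0 : Nat) : Int) = 0)]
          cases ls <;> simp
        | succ k' =>
          have hne : ¬ ((0 : Int) + ((k' + 1 : Nat) : Int) = 0) := by push_cast; omega
          rw [if_neg (by omega : ¬ (k' + 1 = 0)), if_neg hne]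
          have hc : (0 : Int) + ((k' + 1 : Nat) : Int) - 1 = ((k' : Nat) : Int) := by push_cast; ring
          rw [hc, PySem.List.pyGetD_natCast]
          simp only [Nat.add_sub_cancel]
          rw [List.getD_eq_getElem _ _ (by simp; omega : k' < (ws.map (fun w => w.2.1)).length), List.getD_eq_getElem _ _ (by omega : k' < ws.length)]
          simp only [List.getElem_map]
          cases ws[k'].2.1 <;> simp
      · simp [hw]
    · by_cases hw : ws[k].2.1 = none
      · simp only [hw, ne_eq, not_true_eq_false, if_false, if_true]
        by_cases hl : k = ws.length - 1
        · have hci : ((0 : Int) + (k : Int) = (ws.length : Int) - 1) := by omega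
          rw [if_pos hl, if_pos hci]
          cases le <;> simp
        · have hci : ¬ ((0 : Int) + (k : Int) = (ws.length : Int) - 1) := by omega
          rw [if_neg hl, if_neg hci]
          have hkk : k + 1 < ws.length := by omega
          have hc2 : (0 : Int) + (k : Int) + 1 = ((k + 1 : Nat) : Int) := by push_cast; ring
          rw [hc2, PySem.List.pyGetD_natCast, List.getD_eq_getElem _ _ (by simp; omega : k + 1 < (ws.map (fun w => w.1)).length), List.getD_eq_getElem _ _ hkk]
          simp only [List.getElem_map]
          cases ws[k+1].1 <;> simp
      · simp [hw]

theorem pv_zip_enum_map {α β : Type} (l : List α) (s : Int) (f : Int × α → β) :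
    l.zip ((PySem.List.enumerate l s).map f) = (PySem.List.enumerate l s).map (fun p => (p.2, f p)) := by
  induction l generalizing s with
  | nil => simp
  | cons x xs ih => simp [PySem.List.enumerate_cons, ih]

theorem pv_foldl_skip {α β : Type} (p : α → Prop) [DecidablePred p] (f : α → β) (l : List α) (a : List β) :
    l.foldl (fun acc x => if p x then acc else acc ++ [f x]) a = a ++ (l.filter (fun x => !decide (p x))).map f := by
  induction l generalizing a with
  | nil => simp
  | cons x xs ih => by_cases h : p x <;> simp [h, ih]

-- ===== VERDICT (by name: the statement is the Claim_ definition above) =====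
theorem get_full_timestamps_lyrics_data_spec : Claim_equal_get_full_timestamps_lyrics_data := by
  intro data duration only_line skip_none _hdom
  unfold Spec_get_full_timestamps_lyrics_data
  have hz : data.zip ((pvLineStartsB data).zip (pvLineEndsB data duration))
      = (PySem.List.enumerate data 0).map (fun p => (p.2, pvLineTimesA data duration p.1 p.2)) := by
    rw [pv_bounds_eq, pv_zip_enum_map]
  cases only_line <;> cases skip_none
  · -- only_line = false, skip_none = false
    simp only [get_full_timestamps_lyrics_data, get_full_timestamps_lyrics_data_alt, hz]
    simp only [Bool.false_eq_true, if_false, if_true, false_and, and_false, true_or, eq_self_iff_true]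
    simp only [pv_foldl_app_fst, PySem.List.foldl_append_singleton_eq_map, List.nil_append, List.map_map]
    refine List.map_congr_left (fun p _ => ?_)
    simp only [Function.comp, pv_fill_eq]
  · -- only_line = false, skip_none = true
    simp only [get_full_timestamps_lyrics_data, get_full_timestamps_lyrics_data_alt, hz]
    simp only [Bool.false_eq_true, Bool.true_eq_false, if_false, if_true, false_or, true_and, false_and, and_true]
    simp only [pv_foldl_app_snd_if, pv_foldl_skip, List.nil_append, List.filter_map, List.map_map]
    rw [List.filter_congr (l := PySem.List.enumerate data 0)
      (q := fun p => !decide ((pvLineTimesA data duration p.1 p.2).1 = none ∨ (pvLineTimesA data duration p.1 p.2).2 = none))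
      (fun p _ => by
        cases h1 : (pvLineTimesA data duration p.1 p.2).1 <;>
          cases h2 : (pvLineTimesA data duration p.1 p.2).2 <;> simp [h1, h2])]
    refine List.map_congr_left (fun p _ => ?_)
    simp only [Function.comp]
    refine congrArg _ (congrArg _ ?_)
    rw [pv_fill_eq, List.filter_map]
    refine congrArg _ (List.filter_congr (fun q _ => ?_))
    simp only [Function.comp]
    cases h1 : (pvWordTimesA p.2.2.2 (pvLineTimesA data duration p.1 p.2).1 (pvLineTimesA data duration p.1 p.2).2 q.1 q.2).1 <;>
      cases h2 : (pvWordTimesA p.2.2.2 (pvLineTimesA data duration p.1 p.2).1 (pvLineTimesA data duration p.1 p.2).2 q.1 q.2).2 <;>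
        simp [h1, h2]
  · -- only_line = true, skip_none = false
    simp only [get_full_timestamps_lyrics_data, get_full_timestamps_lyrics_data_alt, hz]
    simp only [Bool.true_eq_false, Bool.false_eq_true, if_false, if_true, true_or, true_and, false_and, and_false]
    simp only [pv_foldl_app_fst, PySem.List.foldl_append_singleton_eq_map, List.nil_append, List.map_map]
    rfl
  · -- only_line = true, skip_none = true
    simp only [get_full_timestamps_lyrics_data, get_full_timestamps_lyrics_data_alt, hz]
    simp only [Bool.true_eq_false, if_false, if_true, false_or, true_and]
    simp only [pv_foldl_app_fst_if, pv_foldl_skip, List.nil_append, List.filter_map, List.map_map]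
    rw [List.filter_congr (l := PySem.List.enumerate data 0)
      (q := fun p => !decide ((pvLineTimesA data duration p.1 p.2).1 = none ∨ (pvLineTimesA data duration p.1 p.2).2 = none))
      (fun p _ => by
        cases h1 : (pvLineTimesA data duration p.1 p.2).1 <;>
          cases h2 : (pvLineTimesA data duration p.1 p.2).2 <;> simp [h1, h2])]
    simp only [false_and, and_true, if_false, Bool.false_eq_true]
    rfl
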